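-- pv_equiv track=rewrite | github.com/Phonezzzz/Slavikai | server/http/common/ui_artifacts.py | _is_document_like_output
-- ===== SOURCE A (Python) =====
-- from typing import Final, Literal
--
-- CANVAS_DOCUMENT_LINE_THRESHOLD: Final[int] = 40  # Было 24, теперь 40 для документов
--
-- def _is_document_like_output(normalized: str) -> bool:
--     """Проверяет, является ли вывод документом (не кодом)."""
--     lines = [line.strip() for line in normalized.splitlines() if line.strip()]
--     if len(lines) < CANVAS_DOCUMENT_LINE_THRESHOLD:
--         return False
--     heading_like = sum(
--         1
--         for line in lines[: min(len(lines), 20)]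
--         if line.startswith("#") or line.lower().startswith(("section ", "chapter ", "## "))
--     )
--     return heading_like >= 2
-- ===== SOURCE B (Python) =====
-- def _is_document_like_output(normalized: str) -> bool:
--     """Two-phase early-exit scan: decide the heading verdict after the 20th
--     nonempty line (short-circuit False), then only look for the 40th nonempty
--     line (short-circuit True) -- never counts the whole input when avoidable."""
--     it = iter(normalized.splitlines())
--
--     # Phase 1: consume up to the first 20 nonempty lines, counting headings.
--     heading = 0
--     seen = 0
--     for line in it:
--         t = line.strip()
--         if not t:
--             continue
--         seen += 1
--         if t.startswith("#") or t.lower().startswith(("section ", "chapter ", "## ")):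
--             heading += 1
--         if seen == 20:
--             break
--     if heading < 2:
--         return False
--
--     # Phase 2: the verdict is now solely "are there >= 40 nonempty lines?"
--     need = 40 - seen
--     for line in it:
--         if line.strip():
--             need -= 1
--             if need == 0:
--                 return True
--     return need <= 0
-- ===== Notes on version B (the rewrite author's own statement) =====
-- stated objective: alternative
-- what changed: Replaces the materialize-filter-then-slice-and-sum pipeline with a two-phase early-exit scan: phase 1 consumes only the first 20 nonempty lines and short-circuits False if it sees fewer than 2 headings; phase 2 then only searches for the 40th nonempty line and short-circuits True the moment it is found.
import Mathlib
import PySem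

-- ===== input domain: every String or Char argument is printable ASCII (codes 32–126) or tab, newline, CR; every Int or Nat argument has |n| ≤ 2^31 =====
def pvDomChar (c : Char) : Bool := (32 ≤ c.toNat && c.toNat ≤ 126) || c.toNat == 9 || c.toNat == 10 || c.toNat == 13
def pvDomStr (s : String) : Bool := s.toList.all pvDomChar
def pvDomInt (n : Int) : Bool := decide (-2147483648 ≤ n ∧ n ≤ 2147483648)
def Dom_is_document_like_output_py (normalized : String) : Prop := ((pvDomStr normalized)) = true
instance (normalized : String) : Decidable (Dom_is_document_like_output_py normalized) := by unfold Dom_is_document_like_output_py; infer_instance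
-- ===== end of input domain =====

-- B replaces A's materialize-filter-slice-sum pipeline with a two-phase early-exit scan
-- (decide headings after the 20th nonempty line, then only hunt for the 40th nonempty line).

-- ===== PORT A =====
-- per-line heading test: the identical condition expression appears in both Pythons
def pvHeading (t : String) : Bool :=
  PySem.Str.startswith t "#" ||
  (PySem.Str.startswith (PySem.Str.lower t) "section " ||
   PySem.Str.startswith (PySem.Str.lower t) "chapter " ||
   PySem.Str.startswith (PySem.Str.lower t) "## ")

def is_document_like_output_py (normalized : String) : Bool :=
  -- lines = [line.strip() for line in normalized.splitlines() if line.strip()]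
  let lines : List String :=
    ((PySem.Str.splitlines normalized).filter
      (fun line => !(PySem.Str.strip line == ""))).map PySem.Str.strip
  if lines.length < 40 then false
  else
    -- heading_like = sum(1 for line in lines[:min(len(lines),20)] if <cond>)
    let heading_like : Nat :=
      (PySem.List.slice lines none (some (min (lines.length : Int) 20))).countP pvHeading
    decide (2 ≤ heading_like)

-- ===== PORT B =====
-- phase 1: consume lines until the 20th nonempty one, counting headings;
-- returns (heading, seen, remaining lines of the iterator)
def pvPhase1 : List String → Nat → Nat → Nat × Nat × List String
  | [], heading, seen => (heading, seen, [])
  | line :: rest, heading, seen =>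
    let t := PySem.Str.strip line
    if t == "" then pvPhase1 rest heading seen
    else
      let heading' := if pvHeading t then heading + 1 else heading
      let seen' := seen + 1
      if seen' == 20 then (heading', seen', rest)
      else pvPhase1 rest heading' seen'

-- phase 2: hunt for `need` more nonempty lines, returning true the moment found
def pvPhase2 : Nat → List String → Bool
  | need, [] => decide (need ≤ 0)
  | need, line :: rest =>
    if !(PySem.Str.strip line == "") then
      let need' := need - 1
      if need' == 0 then true else pvPhase2 need' rest
    else pvPhase2 need rest

def is_document_like_output_py_alt (normalized : String) : Bool :=
  let r := pvPhase1 (PySem.Str.splitlines normalized) 0 0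
  if r.1 < 2 then false
  else pvPhase2 (40 - r.2.1) r.2.2

-- ===== PRECONDITION & SPEC =====
def Spec_is_document_like_output_py (normalized : String) (out : Bool) : Prop := out = is_document_like_output_py_alt normalized
instance (normalized : String) (out : Bool) : Decidable (Spec_is_document_like_output_py normalized out) := by unfold Spec_is_document_like_output_py; infer_instance

-- ===== CLAIM (what is proved, stated in full; the proofs are below) =====
def Claim_equal_is_document_like_output_py : Prop := ∀ (normalized : String), Dom_is_document_like_output_py normalized → Spec_is_document_like_output_py normalized (is_document_like_output_py normalized)

-- ===== LEMMAS AND PROOFS =====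

-- the filtered, stripped nonempty lines (A's `lines` list)
def pvF (ls : List String) : List String :=
  (ls.filter (fun line => !(PySem.Str.strip line == ""))).map PySem.Str.strip

theorem pvPhase1_spec (ls : List String) (h s : Nat) (hs : s < 20) :
    pvPhase1 ls h s =
      (h + ((pvF ls).take (20 - s)).countP pvHeading,
       s + min (20 - s) (pvF ls).length,
       (pvPhase1 ls h s).2.2) ∧
    (pvF (pvPhase1 ls h s).2.2).length = (pvF ls).length - (20 - s) := by
  induction ls generalizing h s with
  | nil => simp [pvPhase1, pvF]
  | cons l rest ih =>
    by_cases hl : (PySem.Str.strip l == "") = true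
    · have : pvF (l :: rest) = pvF rest := by simp [pvF, hl]
      simpa [pvPhase1, hl, this] using ih h s hs
    · have hF : pvF (l :: rest) = PySem.Str.strip l :: pvF rest := by
        simp [pvF, hl]
      by_cases h20 : s + 1 = 20
      · have hs19 : s = 19 := by omega
        subst hs19
        have hred : pvPhase1 (l :: rest) h 19 =
            ((if pvHeading (PySem.Str.strip l) then h + 1 else h), 20, rest) := by
          simp [pvPhase1, hl]
        have h1 : (20 : Nat) - 19 = 1 := rfl
        rw [hred, hF, h1]
        refine ⟨?_, by simp⟩
        by_cases hhd : pvHeading (PySem.Str.strip l) = true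
        · simp [hhd, List.take_succ_cons]
        · simp [hhd, List.take_succ_cons]
      · have hs' : s + 1 < 20 := by omega
        obtain ⟨ih1, ih2⟩ := ih (if pvHeading (PySem.Str.strip l) then h + 1 else h) (s + 1) hs'
        have hbeq : ((s + 1 : Nat) == 20) = false := by simp; omega
        have hstep : pvPhase1 (l :: rest) h s =
            pvPhase1 rest (if pvHeading (PySem.Str.strip l) then h + 1 else h) (s + 1) := by
          simp [pvPhase1, hl, hbeq]
        rw [hstep]
        constructor
        · rw [ih1]
          have h1 : 20 - s = (20 - (s + 1)) + 1 := by omega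
          simp only [hF, h1, List.take_succ_cons, List.countP_cons, Prod.mk.injEq]
          by_cases hh : pvHeading (PySem.Str.strip l) = true
          · simp [hh]; omega
          · simp only [Bool.not_eq_true] at hh
            simp [hh]; omega
        · rw [ih2, hF]
          simp only [List.length_cons]
          omega

theorem pvPhase2_spec (ls : List String) (need : Nat) (hn : 0 < need) :
    pvPhase2 need ls = decide (need ≤ (pvF ls).length) := by
  induction ls generalizing need with
  | nil => simp [pvPhase2, pvF]
  | cons l rest ih =>
    by_cases hl : (PySem.Str.strip l == "") = true
    · have : pvF (l :: rest) = pvF rest := by simp [pvF, hl]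
      simpa [pvPhase2, hl, this] using ih need hn
    · have hF : pvF (l :: rest) = PySem.Str.strip l :: pvF rest := by
        simp [pvF, hl]
      by_cases h1 : need = 1
      · subst h1
        simp [pvPhase2, hl, hF]
      · have hn' : 0 < need - 1 := by omega
        have hbeq : ((need - 1 : Nat) == 0) = false := by simp; omega
        have hrec := ih (need - 1) hn'
        simp only [pvPhase2, hl, Bool.not_false, if_true, hbeq, Bool.false_eq_true, if_false, hF,
          List.length_cons, hrec]
        by_cases h2 : need - 1 ≤ (pvF rest).length
        · simp only [decide_eq_true h2, decide_eq_true (by omega : need ≤ (pvF rest).length + 1)]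
        · rw [decide_eq_false h2, decide_eq_false (by omega : ¬ need ≤ (pvF rest).length + 1)]

-- ===== VERDICT (by name: the statement is the Claim_ definition above) =====
theorem is_document_like_output_py_spec : Claim_equal_is_document_like_output_py := by
  intro normalized _
  unfold Spec_is_document_like_output_py is_document_like_output_py is_document_like_output_py_alt
  set ls := PySem.Str.splitlines normalized with hls
  have hFdef : ((ls.filter (fun line => !(PySem.Str.strip line == ""))).map PySem.Str.strip) = pvF ls := rfl
  rw [hFdef]
  set F := pvF ls with hF
  have hslice : PySem.List.slice F none (some (min (F.length : Int) 20)) = F.take 20 := by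
    rw [PySem.List.slice_to F (by positivity)]
    have h1 : (min (F.length : Int) 20).toNat = min F.length 20 := by omega
    rw [h1]
    rcases le_total F.length 20 with h | h
    · rw [min_eq_left h, List.take_length, List.take_of_length_le h]
    · rw [min_eq_right h]
  obtain ⟨h1, h2⟩ := pvPhase1_spec ls 0 0 (by omega)
  rw [← hF] at h1 h2
  rw [h1]
  simp only [hslice, Nat.zero_add, Nat.sub_zero]
  rw [pvPhase2_spec _ _ (by omega), h2]
  simp only [Nat.sub_zero]
  split_ifs with hlen hh
  · rfl
  · rw [eq_comm, decide_eq_false_iff_not]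
    omega
  · rw [decide_eq_false_iff_not]
    omega
  · rw [decide_eq_true (by omega : (2:Nat) ≤ _), decide_eq_true (by omega : _ ≤ F.length - 20)]
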